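-- pv_equiv track=rewrite | github.com/Barabasi-Lab/Geneformer-NetworkMedicine | base_utils/networks.py | reduce_not_in_cluster_nodes
-- ===== SOURCE A (Python) =====
-- from collections import deque, defaultdict
-- from collections import defaultdict, Counter
--
-- def reduce_not_in_cluster_nodes(all_degrees, neighbors, G, not_in_cluster, cluster_nodes, alpha):
--     reduced_not_in_cluster = {}
--     kb2k = defaultdict(dict)
--     for node in not_in_cluster:
--         k = all_degrees[node]
--         kb = sum(1 for neighbor in neighbors[node] if neighbor in cluster_nodes)
--         k += (alpha - 1) * kb
--         kb += (alpha - 1) * kb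
--         kb2k[kb][k] = node
--
--     k2kb = defaultdict(dict)
--     for kb, k2node in kb2k.items():
--         min_k = min(k2node.keys())
--         node = k2node[min_k]
--         k2kb[min_k][kb] = node
--
--     for k, kb2node in k2kb.items():
--         max_kb = max(kb2node.keys())
--         node = kb2node[max_kb]
--         reduced_not_in_cluster[node] = (max_kb, k)
--     return reduced_not_in_cluster
-- ===== SOURCE B (Python) =====
-- def reduce_not_in_cluster_nodes(all_degrees, neighbors, G, not_in_cluster, cluster_nodes, alpha):
--     # one pass: per scaled kb keep the (running-min k, node), replacing on equal k (last wins)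
--     best = {}
--     for node in not_in_cluster:
--         kb0 = sum(1 for neighbor in neighbors[node] if neighbor in cluster_nodes)
--         k = all_degrees[node] + (alpha - 1) * kb0
--         kb = alpha * kb0
--         if kb not in best or k <= best[kb][0]:
--             best[kb] = (k, node)
--     # second pass: per min-k keep the (running-max kb, node)
--     sel = {}
--     for kb, (k, node) in best.items():
--         if k not in sel or sel[k][0] <= kb:
--             sel[k] = (kb, node)
--     return {node: (kb, k) for k, (kb, node) in sel.items()}
-- ===== Notes on version B (the rewrite author's own statement) =====
-- stated objective: simpler
-- what changed: B replaces A's three build-then-scan passes over nested defaultdicts (kb2k and k2kb, each scanned with min()/max() over key sets) by two flat dicts maintained with running-min/running-max updates in single passes (replace on equal min-k so the last node wins, as A's dict overwrite does).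
import Mathlib
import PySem

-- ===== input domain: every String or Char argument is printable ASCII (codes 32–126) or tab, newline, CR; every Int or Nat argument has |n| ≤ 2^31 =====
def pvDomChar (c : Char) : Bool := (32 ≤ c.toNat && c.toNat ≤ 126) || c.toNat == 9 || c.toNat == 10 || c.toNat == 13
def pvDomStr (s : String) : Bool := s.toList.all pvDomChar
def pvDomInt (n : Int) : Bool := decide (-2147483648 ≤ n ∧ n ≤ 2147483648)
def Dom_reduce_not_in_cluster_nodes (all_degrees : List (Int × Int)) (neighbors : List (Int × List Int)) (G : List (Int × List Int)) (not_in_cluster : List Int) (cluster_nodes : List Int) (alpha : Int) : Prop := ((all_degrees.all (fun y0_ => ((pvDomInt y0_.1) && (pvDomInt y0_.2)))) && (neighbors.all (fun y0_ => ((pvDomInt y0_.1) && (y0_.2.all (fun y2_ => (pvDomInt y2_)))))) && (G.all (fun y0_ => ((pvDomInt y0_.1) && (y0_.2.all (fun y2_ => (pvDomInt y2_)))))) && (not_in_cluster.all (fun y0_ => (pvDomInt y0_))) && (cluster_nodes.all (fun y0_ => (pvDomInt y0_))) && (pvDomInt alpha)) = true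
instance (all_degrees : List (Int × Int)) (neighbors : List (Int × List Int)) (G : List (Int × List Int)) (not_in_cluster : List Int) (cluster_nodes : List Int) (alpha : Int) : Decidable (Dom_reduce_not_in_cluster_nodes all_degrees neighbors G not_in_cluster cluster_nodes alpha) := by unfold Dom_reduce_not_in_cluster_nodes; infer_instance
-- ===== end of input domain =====

-- B fuses A's build-then-scan nested dicts into two running-extremum passes (objective: simpler, same asymptotic cost).

-- first-match lookup in an input association list (a Python dict argument); shared input decoding for both ports
def pvLookup {α : Type} (d : List (Int × α)) (node : Int) (dflt : α) : α :=
  ((d.find? (fun p => p.1 == node)).map (fun p => p.2)).getD dflt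

-- ===== PORT A =====
-- loop body of A's phase 1: kb2k[kb][k] = node
def pvA_step1 (all_degrees : List (Int × Int)) (neighbors : List (Int × List Int)) (cluster_nodes : List Int) (alpha : Int) (d : PySem.Dict Int (PySem.Dict Int Int)) (node : Int) : PySem.Dict Int (PySem.Dict Int Int) :=
  let k0 := pvLookup all_degrees node 0
  let kb0 : Int := ((pvLookup neighbors node []).countP (fun neighbor => cluster_nodes.contains neighbor) : Int)
  let k := k0 + (alpha - 1) * kb0
  let kb := kb0 + (alpha - 1) * kb0
  d.insert kb ((d.getD kb PySem.Dict.empty).insert k node)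

-- loop body of A's phase 2: k2kb[min_k][kb] = node  (inner dicts are never empty, so the getD defaults are never taken)
def pvA_step2 (d : PySem.Dict Int (PySem.Dict Int Int)) (p : Int × PySem.Dict Int Int) : PySem.Dict Int (PySem.Dict Int Int) :=
  let min_k := (PySem.List.min? p.2.keys (fun x => x)).getD 0
  let node := p.2.getD min_k 0
  d.insert min_k ((d.getD min_k PySem.Dict.empty).insert p.1 node)

-- loop body of A's phase 3: reduced_not_in_cluster[node] = (max_kb, k)
def pvA_step3 (r : PySem.Dict Int (Int × Int)) (p : Int × PySem.Dict Int Int) : PySem.Dict Int (Int × Int) :=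
  let max_kb := (PySem.List.max? p.2.keys (fun x => x)).getD 0
  let node := p.2.getD max_kb 0
  r.insert node (max_kb, p.1)

def reduce_not_in_cluster_nodes (all_degrees : List (Int × Int)) (neighbors : List (Int × List Int)) (G : List (Int × List Int)) (not_in_cluster : List Int) (cluster_nodes : List Int) (alpha : Int) : List (Int × Int × Int) :=
  let kb2k := not_in_cluster.foldl (pvA_step1 all_degrees neighbors cluster_nodes alpha) PySem.Dict.empty
  let k2kb := kb2k.items.foldl pvA_step2 PySem.Dict.empty
  let reduced := k2kb.items.foldl pvA_step3 PySem.Dict.empty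
  reduced.items

-- ===== PORT B =====
-- loop body of B's first pass: best[kb] = (running-min k, node), replace on equal k (last wins)
def pvB_step1 (all_degrees : List (Int × Int)) (neighbors : List (Int × List Int)) (cluster_nodes : List Int) (alpha : Int) (b : PySem.Dict Int (Int × Int)) (node : Int) : PySem.Dict Int (Int × Int) :=
  let kb0 : Int := ((pvLookup neighbors node []).countP (fun neighbor => cluster_nodes.contains neighbor) : Int)
  let k := pvLookup all_degrees node 0 + (alpha - 1) * kb0
  let kb := alpha * kb0
  match b.get? kb with
  | none => b.insert kb (k, node)
  | some pr => if k ≤ pr.1 then b.insert kb (k, node) else b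

-- loop body of B's second pass: sel[k] = (running-max kb, node)
def pvB_step2 (s : PySem.Dict Int (Int × Int)) (q : Int × Int × Int) : PySem.Dict Int (Int × Int) :=
  match s.get? q.2.1 with
  | none => s.insert q.2.1 (q.1, q.2.2)
  | some pr => if pr.1 ≤ q.1 then s.insert q.2.1 (q.1, q.2.2) else s

def reduce_not_in_cluster_nodes_alt (all_degrees : List (Int × Int)) (neighbors : List (Int × List Int)) (G : List (Int × List Int)) (not_in_cluster : List Int) (cluster_nodes : List Int) (alpha : Int) : List (Int × Int × Int) :=
  let best := not_in_cluster.foldl (pvB_step1 all_degrees neighbors cluster_nodes alpha) PySem.Dict.empty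
  let sel := best.items.foldl pvB_step2 PySem.Dict.empty
  (sel.items.foldl (fun r q => r.insert q.2.2 (q.2.1, q.1)) PySem.Dict.empty).items

-- ===== PRECONDITION & SPEC =====
-- Pre_ excludes exactly the inputs on which Python A raises KeyError: a node of not_in_cluster missing from all_degrees or neighbors.
def Pre_reduce_not_in_cluster_nodes (all_degrees : List (Int × Int)) (neighbors : List (Int × List Int)) (G : List (Int × List Int)) (not_in_cluster : List Int) (cluster_nodes : List Int) (alpha : Int) : Prop :=
  ∀ node ∈ not_in_cluster, node ∈ all_degrees.map Prod.fst ∧ node ∈ neighbors.map Prod.fst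
instance (all_degrees : List (Int × Int)) (neighbors : List (Int × List Int)) (G : List (Int × List Int)) (not_in_cluster : List Int) (cluster_nodes : List Int) (alpha : Int) : Decidable (Pre_reduce_not_in_cluster_nodes all_degrees neighbors G not_in_cluster cluster_nodes alpha) := by unfold Pre_reduce_not_in_cluster_nodes; infer_instance

def pvWitness_reduce_not_in_cluster_nodes : (List (Int × Int)) × (List (Int × List Int)) × (List (Int × List Int)) × List Int × List Int × Int :=
  ([(0, 2), (1, 3), (2, 1)], [(0, [1, 2]), (1, [0]), (2, [0])], [], [0, 1, 2], [1, 2], 2)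

def Spec_reduce_not_in_cluster_nodes (all_degrees : List (Int × Int)) (neighbors : List (Int × List Int)) (G : List (Int × List Int)) (not_in_cluster : List Int) (cluster_nodes : List Int) (alpha : Int) (out : List (Int × Int × Int)) : Prop := out = reduce_not_in_cluster_nodes_alt all_degrees neighbors G not_in_cluster cluster_nodes alpha
instance (all_degrees : List (Int × Int)) (neighbors : List (Int × List Int)) (G : List (Int × List Int)) (not_in_cluster : List Int) (cluster_nodes : List Int) (alpha : Int) (out : List (Int × Int × Int)) : Decidable (Spec_reduce_not_in_cluster_nodes all_degrees neighbors G not_in_cluster cluster_nodes alpha out) := by unfold Spec_reduce_not_in_cluster_nodes; infer_instance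

-- ===== CLAIM (what is proved, stated in full; the proofs are below) =====
def Claim_equal_reduce_not_in_cluster_nodes : Prop := ∀ (all_degrees : List (Int × Int)) (neighbors : List (Int × List Int)) (G : List (Int × List Int)) (not_in_cluster : List Int) (cluster_nodes : List Int) (alpha : Int), Dom_reduce_not_in_cluster_nodes all_degrees neighbors G not_in_cluster cluster_nodes alpha → Pre_reduce_not_in_cluster_nodes all_degrees neighbors G not_in_cluster cluster_nodes alpha → Spec_reduce_not_in_cluster_nodes all_degrees neighbors G not_in_cluster cluster_nodes alpha (reduce_not_in_cluster_nodes all_degrees neighbors G not_in_cluster cluster_nodes alpha)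

-- ===== LEMMAS AND PROOFS =====

-- the (min key, value at it) / (max key, value at it) summaries A's phases 2/3 take of an inner dict
def pvMinPair (d : PySem.Dict Int Int) : Int × Int :=
  ((PySem.List.min? d.keys (fun x => x)).getD 0, d.getD ((PySem.List.min? d.keys (fun x => x)).getD 0) 0)
def pvMaxPair (d : PySem.Dict Int Int) : Int × Int :=
  ((PySem.List.max? d.keys (fun x => x)).getD 0, d.getD ((PySem.List.max? d.keys (fun x => x)).getD 0) 0)

-- invariant relating A's nested-dict state d to B's running-extremum state b
def pvInvG (g : PySem.Dict Int Int → Int × Int) (d : PySem.Dict Int (PySem.Dict Int Int)) (b : PySem.Dict Int (Int × Int)) : Prop :=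
  d.keys.Nodup ∧ (∀ p ∈ d.items, p.2.items ≠ [] ∧ p.2.keys.Nodup) ∧ b.items = d.items.map (fun p => (p.1, g p.2))

lemma pv_get?_map (g : PySem.Dict Int Int → Int × Int) (d : PySem.Dict Int (PySem.Dict Int Int)) (b : PySem.Dict Int (Int × Int))
    (h : b.items = d.items.map (fun p => (p.1, g p.2))) (K : Int) :
    b.get? K = (d.get? K).map g := by
  simp only [PySem.Dict.get?, h, List.find?_map]
  have hp : ((fun (p : Int × (Int × Int)) => p.1 == K) ∘ (fun (p : Int × PySem.Dict Int Int) => (p.1, g p.2))) = (fun p => p.1 == K) := rfl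
  rw [hp]
  cases List.find? (fun p => p.1 == K) d.items <;> rfl

lemma pv_min?_append (l : List Int) (x m : Int) (h : PySem.List.min? l (fun y => y) = some m) :
    PySem.List.min? (l ++ [x]) (fun y => y) = if x < m then some x else some m := by
  simp only [PySem.List.min?] at h ⊢
  rw [List.foldl_append, h]
  rfl

lemma pv_max?_append (l : List Int) (x m : Int) (h : PySem.List.max? l (fun y => y) = some m) :
    PySem.List.max? (l ++ [x]) (fun y => y) = if m < x then some x else some m := by
  simp only [PySem.List.max?] at h ⊢
  rw [List.foldl_append, h]
  rfl

lemma pv_keys_ne_nil (d : PySem.Dict Int Int) (h : d.items ≠ []) : d.keys ≠ [] := by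
  simp only [PySem.Dict.keys]
  simpa using h

lemma pv_minPair_single (c w : Int) : pvMinPair (PySem.Dict.empty.insert c w) = (c, w) := by
  simp [pvMinPair, PySem.Dict.insert, PySem.Dict.contains, PySem.Dict.empty, PySem.Dict.keys,
    PySem.List.min?, PySem.Dict.getD, PySem.Dict.get?]

lemma pv_maxPair_single (c w : Int) : pvMaxPair (PySem.Dict.empty.insert c w) = (c, w) := by
  simp [pvMaxPair, PySem.Dict.insert, PySem.Dict.contains, PySem.Dict.empty, PySem.Dict.keys,
    PySem.List.max?, PySem.Dict.getD, PySem.Dict.get?]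

lemma pv_minPair_insert (inner : PySem.Dict Int Int) (k v : Int)
    (hne : inner.items ≠ []) (hnd : inner.keys.Nodup) :
    pvMinPair (inner.insert k v) = if k ≤ (pvMinPair inner).1 then (k, v) else pvMinPair inner := by
  obtain ⟨m, hm⟩ : ∃ m, PySem.List.min? inner.keys (fun x => x) = some m := by
    cases hmm : PySem.List.min? inner.keys (fun x => x) with
    | none => exact absurd ((PySem.List.min?_eq_none_iff _ _).mp hmm) (pv_keys_ne_nil inner hne)
    | some m => exact ⟨m, rfl⟩
  have hm_mem : m ∈ inner.keys := PySem.List.min?_mem hm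
  have hm_min : ∀ y ∈ inner.keys, m ≤ y := fun y hy => PySem.List.min?_isMin hm y hy
  have hMP : pvMinPair inner = (m, inner.getD m 0) := by simp [pvMinPair, hm]
  rw [hMP]
  by_cases hc : inner.contains k
  · have hkeq : (inner.insert k v).keys = inner.keys := PySem.Dict.keys_insert_of_contains _ _ hc
    have hkmem : k ∈ inner.keys := (PySem.Dict.contains_iff_mem_keys _ _).mp hc
    have hmk : m ≤ k := hm_min k hkmem
    by_cases hle : k ≤ m
    · have : k = m := le_antisymm hle hmk
      subst this
      simp [pvMinPair, hkeq, hm]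
    · have hne' : m ≠ k := by omega
      simp [pvMinPair, hkeq, hm, PySem.Dict.getD_insert, hne', hle]
  · have hc' : inner.contains k = false := by simpa using hc
    have hkeq : (inner.insert k v).keys = inner.keys ++ [k] := PySem.Dict.keys_insert_of_not_contains _ _ hc'
    have hknot : k ∉ inner.keys := by
      intro hmem; exact absurd ((PySem.Dict.contains_iff_mem_keys _ _).mpr hmem) (by simp [hc'])
    have hkm : k ≠ m := fun h => hknot (h ▸ hm_mem)
    by_cases hle : k ≤ m
    · have hlt : k < m := lt_of_le_of_ne hle hkm
      simp [pvMinPair, hkeq, pv_min?_append _ _ _ hm, hlt, hle]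
    · have hnlt : ¬ k < m := by omega
      have hmk : m ≠ k := fun h => hkm h.symm
      simp [pvMinPair, hkeq, pv_min?_append _ _ _ hm, hnlt, PySem.Dict.getD_insert, hmk, hle]

lemma pv_maxPair_insert (inner : PySem.Dict Int Int) (k v : Int)
    (hne : inner.items ≠ []) (hnd : inner.keys.Nodup) :
    pvMaxPair (inner.insert k v) = if (pvMaxPair inner).1 ≤ k then (k, v) else pvMaxPair inner := by
  obtain ⟨m, hm⟩ : ∃ m, PySem.List.max? inner.keys (fun x => x) = some m := by
    cases hmm : PySem.List.max? inner.keys (fun x => x) with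
    | none => exact absurd ((PySem.List.max?_eq_none_iff _ _).mp hmm) (pv_keys_ne_nil inner hne)
    | some m => exact ⟨m, rfl⟩
  have hm_mem : m ∈ inner.keys := PySem.List.max?_mem hm
  have hm_max : ∀ y ∈ inner.keys, y ≤ m := fun y hy => PySem.List.max?_isMax hm y hy
  have hMP : pvMaxPair inner = (m, inner.getD m 0) := by simp [pvMaxPair, hm]
  rw [hMP]
  by_cases hc : inner.contains k
  · have hkeq : (inner.insert k v).keys = inner.keys := PySem.Dict.keys_insert_of_contains _ _ hc
    have hkmem : k ∈ inner.keys := (PySem.Dict.contains_iff_mem_keys _ _).mp hc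
    have hmk : k ≤ m := hm_max k hkmem
    by_cases hle : m ≤ k
    · have : k = m := le_antisymm hmk hle
      subst this
      simp [pvMaxPair, hkeq, hm]
    · have hne' : m ≠ k := by omega
      simp [pvMaxPair, hkeq, hm, PySem.Dict.getD_insert, hne', hle]
  · have hc' : inner.contains k = false := by simpa using hc
    have hkeq : (inner.insert k v).keys = inner.keys ++ [k] := PySem.Dict.keys_insert_of_not_contains _ _ hc'
    have hknot : k ∉ inner.keys := by
      intro hmem; exact absurd ((PySem.Dict.contains_iff_mem_keys _ _).mpr hmem) (by simp [hc'])
    have hkm : k ≠ m := fun h => hknot (h ▸ hm_mem)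
    by_cases hle : m ≤ k
    · have hlt : m < k := lt_of_le_of_ne hle (fun h => hkm h.symm)
      simp [pvMaxPair, hkeq, pv_max?_append _ _ _ hm, hlt, hle]
    · have hnlt : ¬ m < k := by omega
      have hmk : m ≠ k := fun h => hkm h.symm
      simp [pvMaxPair, hkeq, pv_max?_append _ _ _ hm, hnlt, PySem.Dict.getD_insert, hmk, hle]

lemma pv_step_gen (g : PySem.Dict Int Int → Int × Int) (cmp : Int → Int → Prop) [DecidableRel cmp]
    (K c w : Int)
    (hsingle : g (PySem.Dict.empty.insert c w) = (c, w))
    (hins : ∀ inner : PySem.Dict Int Int, inner.items ≠ [] → inner.keys.Nodup →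
        g (inner.insert c w) = if cmp c (g inner).1 then (c, w) else g inner)
    (d : PySem.Dict Int (PySem.Dict Int Int)) (b : PySem.Dict Int (Int × Int))
    (h : pvInvG g d b) :
    pvInvG g (d.insert K ((d.getD K PySem.Dict.empty).insert c w))
      (match b.get? K with
       | none => b.insert K (c, w)
       | some pr => if cmp c pr.1 then b.insert K (c, w) else b) := by
  obtain ⟨hnd, hinner, hmap⟩ := h
  have hbg := pv_get?_map g d b hmap K
  cases hg : d.get? K with
  | none =>
    have hbK : b.get? K = none := by rw [hbg, hg]; rfl
    have hcont : d.contains K = false := by rw [PySem.Dict.contains_eq_isSome_get?, hg]; rfl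
    have hbcont : b.contains K = false := by rw [PySem.Dict.contains_eq_isSome_get?, hbK]; rfl
    have hgetD : d.getD K PySem.Dict.empty = PySem.Dict.empty := PySem.Dict.getD_of_get?_eq_none _ _ hg
    rw [hbK, hgetD]
    refine ⟨PySem.Dict.nodup_keys_insert _ _ _ hnd, ?_, ?_⟩
    · intro p hp
      rw [PySem.Dict.items_insert_of_not_contains _ _ hcont] at hp
      rcases List.mem_append.mp hp with hp | hp
      · exact hinner p hp
      · have : p = (K, PySem.Dict.empty.insert c w) := by simpa using hp
        subst this
        refine ⟨List.ne_nil_of_mem (PySem.Dict.mem_items_insert_self _ _ _), ?_⟩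
        exact PySem.Dict.nodup_keys_insert _ _ _ (by simp [PySem.Dict.empty, PySem.Dict.keys])
    · rw [PySem.Dict.items_insert_of_not_contains _ _ hcont,
        PySem.Dict.items_insert_of_not_contains _ _ hbcont, List.map_append, hmap]
      simp [hsingle]
  | some inner =>
    have hbK : b.get? K = some (g inner) := by rw [hbg, hg]; rfl
    have hcont : d.contains K = true := by rw [PySem.Dict.contains_eq_isSome_get?, hg]; rfl
    have hbcont : b.contains K = true := by rw [PySem.Dict.contains_eq_isSome_get?, hbK]; rfl
    have hgetD : d.getD K PySem.Dict.empty = inner := PySem.Dict.getD_of_get?_eq_some _ _ hg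
    have hmemd : (K, inner) ∈ d.items := PySem.Dict.mem_items_of_get?_eq_some _ hg
    obtain ⟨hne0, hnd0⟩ := hinner _ hmemd
    have hins' := hins inner hne0 hnd0
    have huniq : ∀ p ∈ d.items, p.1 = K → p = (K, inner) := by
      intro p hp hpK
      have hmem' : (p.1, p.2) ∈ d.items := by simpa using hp
      have := PySem.Dict.get?_of_mem_items _ hmem' hnd
      rw [hpK, hg] at this
      have hv : p.2 = inner := by injection this with h; exact h.symm
      rw [← hpK, ← hv]
    have hinnerprops : ∀ p ∈ (d.insert K (inner.insert c w)).items, p.2.items ≠ [] ∧ p.2.keys.Nodup := by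
      intro p hp
      rw [PySem.Dict.items_insert_of_contains _ _ hcont] at hp
      obtain ⟨q, hq, rfl⟩ := List.mem_map.mp hp
      by_cases hqK : (q.1 == K) = true
      · simp only [hqK, if_pos]
        refine ⟨List.ne_nil_of_mem (PySem.Dict.mem_items_insert_self _ _ _), PySem.Dict.nodup_keys_insert _ _ _ hnd0⟩
      · simp only [hqK, if_neg, Bool.false_eq_true, not_false_iff]
        exact hinner q hq
    rw [hbK, hgetD]
    dsimp only
    by_cases hcmp : cmp c (g inner).1
    · rw [if_pos hcmp]
      refine ⟨PySem.Dict.nodup_keys_insert _ _ _ hnd, hinnerprops, ?_⟩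
      rw [PySem.Dict.items_insert_of_contains _ _ hcont,
        PySem.Dict.items_insert_of_contains _ _ hbcont, hmap, List.map_map, List.map_map]
      apply List.map_congr_left
      intro p hp
      by_cases hpK : p.1 = K
      · have hpe := huniq p hp hpK
        subst hpe
        simp [Function.comp, hins', hcmp]
      · simp [Function.comp, hpK]
    · rw [if_neg hcmp]
      refine ⟨PySem.Dict.nodup_keys_insert _ _ _ hnd, hinnerprops, ?_⟩
      rw [PySem.Dict.items_insert_of_contains _ _ hcont, hmap, List.map_map]
      symm
      apply List.map_congr_left
      intro p hp
      by_cases hpK : p.1 = K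
      · have hpe := huniq p hp hpK
        subst hpe
        simp [Function.comp, hins', hcmp]
      · simp [Function.comp, hpK]

lemma pv_fold1 (all_degrees : List (Int × Int)) (neighbors : List (Int × List Int)) (cluster_nodes : List Int) (alpha : Int)
    (nodes : List Int) (d : PySem.Dict Int (PySem.Dict Int Int)) (b : PySem.Dict Int (Int × Int))
    (h : pvInvG pvMinPair d b) :
    pvInvG pvMinPair (nodes.foldl (pvA_step1 all_degrees neighbors cluster_nodes alpha) d)
      (nodes.foldl (pvB_step1 all_degrees neighbors cluster_nodes alpha) b) := by
  induction nodes generalizing d b with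
  | nil => exact h
  | cons x xs ih =>
    refine ih _ _ ?_
    have harith : ∀ kb0 : Int, kb0 + (alpha - 1) * kb0 = alpha * kb0 := by intro kb0; ring
    simp only [pvA_step1, pvB_step1, harith]
    exact pv_step_gen pvMinPair (fun a bb => a ≤ bb) _ _ _
      (pv_minPair_single _ _) (fun inner hne hnd => pv_minPair_insert inner _ _ hne hnd) d b h

lemma pv_fold2 (l : List (Int × PySem.Dict Int Int)) (d : PySem.Dict Int (PySem.Dict Int Int)) (s : PySem.Dict Int (Int × Int))
    (h : pvInvG pvMaxPair d s) :
    pvInvG pvMaxPair (l.foldl pvA_step2 d)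
      (l.foldl (fun s p => pvB_step2 s (p.1, pvMinPair p.2)) s) := by
  induction l generalizing d s with
  | nil => exact h
  | cons p t ih =>
    refine ih _ _ ?_
    simp only [pvA_step2, pvB_step2, pvMinPair]
    exact pv_step_gen pvMaxPair (fun a bb => bb ≤ a) _ _ _
      (pv_maxPair_single _ _) (fun inner hne hnd => pv_maxPair_insert inner _ _ hne hnd) d s h

lemma pv_inv_empty (g : PySem.Dict Int Int → Int × Int) : pvInvG g PySem.Dict.empty PySem.Dict.empty := by
  refine ⟨by simp [PySem.Dict.empty, PySem.Dict.keys], by simp [PySem.Dict.empty], by simp [PySem.Dict.empty]⟩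

-- ===== VERDICT (by name: the statement is the Claim_ definition above) =====
theorem reduce_not_in_cluster_nodes_spec : Claim_equal_reduce_not_in_cluster_nodes := by
  intro all_degrees neighbors G not_in_cluster cluster_nodes alpha _hdom _hpre
  unfold Spec_reduce_not_in_cluster_nodes reduce_not_in_cluster_nodes reduce_not_in_cluster_nodes_alt
  obtain ⟨_, _, hmap1⟩ := pv_fold1 all_degrees neighbors cluster_nodes alpha not_in_cluster _ _ (pv_inv_empty pvMinPair)
  simp only [hmap1, List.foldl_map]
  obtain ⟨_, _, hmap2⟩ :=
    pv_fold2 ((not_in_cluster.foldl (pvA_step1 all_degrees neighbors cluster_nodes alpha) PySem.Dict.empty).items)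
      PySem.Dict.empty PySem.Dict.empty (pv_inv_empty pvMaxPair)
  simp only [hmap2, List.foldl_map]
  rfl
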